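-- pv_equiv track=rewrite | github.com/hombrenieve/adventofcode | 2024/preparation/day1p1_2017.py | check_line
-- ===== SOURCE A (Python) =====
-- def check_line(line):
--     numbers = [int(i) for i in line]
--     sum = 0
--     for i in range(1, len(numbers)):
--         if numbers[i] == numbers[i-1]:
--             sum += numbers[i]
--     if numbers[len(numbers)-1] == numbers[0]:
--         sum += numbers[0]
--     return sum
-- ===== SOURCE B (Python) =====
-- def _lead(d, ns):
--     # length of the leading run of ns consisting of d
--     k = 0
--     for x in ns:
--         if x != d:
--             break
--         k += 1
--     return k
--
--
-- def _runs_sum(ns):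
--     # run-length decomposition: each maximal run of k equal digits d
--     # contributes d * (k - 1) to the sum of matching adjacent pairs
--     total = 0
--     while ns:
--         k = _lead(ns[0], ns[1:])
--         total += ns[0] * k
--         ns = ns[k + 1:]
--     return total
--
--
-- def check_line(line):
--     numbers = [int(c) for c in line]
--     total = _runs_sum(numbers)
--     if numbers[-1] == numbers[0]:
--         total += numbers[0]
--     return total
-- ===== Notes on version B (the rewrite author's own statement) =====
-- stated objective: alternative
-- what changed: Replaces A's per-index neighbour comparison with a run-length decomposition: the list is consumed run by run, each maximal run of k equal digits d contributing d*(k-1) via a closed formula, plus the circular wrap term.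
import Mathlib
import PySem

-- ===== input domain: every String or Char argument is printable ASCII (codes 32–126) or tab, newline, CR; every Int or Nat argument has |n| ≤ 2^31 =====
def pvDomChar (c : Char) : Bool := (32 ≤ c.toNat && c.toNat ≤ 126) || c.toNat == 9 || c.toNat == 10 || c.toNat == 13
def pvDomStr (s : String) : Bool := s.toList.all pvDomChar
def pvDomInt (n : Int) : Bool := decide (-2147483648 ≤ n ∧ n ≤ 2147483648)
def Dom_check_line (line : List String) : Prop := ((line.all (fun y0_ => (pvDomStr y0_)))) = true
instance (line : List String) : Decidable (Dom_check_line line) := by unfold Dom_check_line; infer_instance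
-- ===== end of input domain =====

-- B replaces A's per-index neighbour comparison with a run-length decomposition: each maximal
-- run of k equal digits d contributes d*(k-1) by a closed formula, plus the circular wrap term.

-- ===== PORT A =====
def check_line (line : List String) : Int :=
  let numbers := line.map (fun s => (PySem.Int.ofStr? s).getD 0)
  let sum := (PySem.List.pyRange 1 (numbers.length : Int) 1).foldl
    (fun acc i =>
      if PySem.List.pyGetD numbers i 0 = PySem.List.pyGetD numbers (i - 1) 0
      then acc + PySem.List.pyGetD numbers i 0 else acc) 0
  if PySem.List.pyGetD numbers ((numbers.length : Int) - 1) 0 = PySem.List.pyGetD numbers 0 0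
  then sum + PySem.List.pyGetD numbers 0 0 else sum

-- ===== PORT B =====
-- _lead(d, ns): length of the leading run of ns equal to d (the for-loop with break)
def lead (d : Int) : List Int → Nat
  | [] => 0
  | x :: t => if x = d then lead d t + 1 else 0

-- _runs_sum's while loop with its accumulator; ns[1:] on d::t is t and
-- ns[k+1:] is t.drop k (slices with nonnegative bounds = drop, exact here)
def runsSumLoop (total : Int) (ns : List Int) : Int :=
  match ns with
  | [] => total
  | d :: t => runsSumLoop (total + d * (lead d t : Int)) (t.drop (lead d t))
termination_by ns.length
decreasing_by simp

def check_line_alt (line : List String) : Int :=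
  let numbers := line.map (fun s => (PySem.Int.ofStr? s).getD 0)
  let total := runsSumLoop 0 numbers
  if PySem.List.pyGetD numbers (-1) 0 = PySem.List.pyGetD numbers 0 0
  then total + PySem.List.pyGetD numbers 0 0 else total

-- ===== PRECONDITION & SPEC =====
-- Pre_ excludes exactly the inputs where the Python A raises: the empty list (IndexError on
-- numbers[0]) and lists containing a string int() rejects (ValueError); B raises there too.
def Pre_check_line (line : List String) : Prop :=
  line ≠ [] ∧ (line.all (fun s => (PySem.Int.ofStr? s).isSome)) = true
instance (line : List String) : Decidable (Pre_check_line line) := by unfold Pre_check_line; infer_instance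
def pvWitness_check_line : List String := ["1", "1", "2", "2"]

def Spec_check_line (line : List String) (out : Int) : Prop := out = check_line_alt line
instance (line : List String) (out : Int) : Decidable (Spec_check_line line out) := by unfold Spec_check_line; infer_instance

-- ===== CLAIM (what is proved, stated in full; the proofs are below) =====
def Claim_equal_check_line : Prop := ∀ (line : List String), Dom_check_line line → Pre_check_line line → Spec_check_line line (check_line line)

-- ===== LEMMAS AND PROOFS =====

/-- Sum over adjacent pairs: adds the later element when it equals its predecessor. -/
def adjPairs : List Int → Int
  | a :: b :: t => (if b = a then b else 0) + adjPairs (b :: t)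
  | _ => 0

theorem lemA (ns : List Int) : ∀ (d k : Nat) (acc : Int), ns.length - k = d →
    (PySem.List.pyRange ((k : Int) + 1) (ns.length : Int) 1).foldl
      (fun acc i =>
        if PySem.List.pyGetD ns i 0 = PySem.List.pyGetD ns (i - 1) 0
        then acc + PySem.List.pyGetD ns i 0 else acc) acc
    = acc + adjPairs (ns.drop k) := by
  intro d
  induction d with
  | zero =>
      intro k acc hd
      have hk : ns.length ≤ k := by omega
      rw [PySem.List.pyRange_one_eq_nil (by exact_mod_cast (by omega : (ns.length : Int) ≤ (k : Int) + 1))]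
      rw [List.drop_eq_nil_of_le hk]
      simp [adjPairs]
  | succ d ih =>
      intro k acc hd
      by_cases hk1 : k + 1 < ns.length
      · have hlt : ((k : Int) + 1) < (ns.length : Int) := by exact_mod_cast hk1
        rw [PySem.List.pyRange_one_cons hlt]
        simp only [List.foldl_cons]
        have e1 : PySem.List.pyGetD ns ((k : Int) + 1) 0 = ns[k + 1]'hk1 := by
          rw [show ((k : Int) + 1) = ((k + 1 : Nat) : Int) by push_cast; ring]
          rw [PySem.List.pyGetD_natCast, List.getD_eq_getElem ns 0 hk1]
        have e2 : PySem.List.pyGetD ns ((k : Int) + 1 - 1) 0 = ns[k]'(by omega) := by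
          rw [show ((k : Int) + 1 - 1) = ((k : Nat) : Int) by ring]
          rw [PySem.List.pyGetD_natCast, List.getD_eq_getElem ns 0 (by omega)]
        rw [e1, e2]
        rw [show ((k : Int) + 1 + 1) = ((k + 1 : Nat) : Int) + 1 by push_cast; ring]
        rw [ih (k + 1) _ (by omega)]
        have hdrop : ns.drop k = ns[k]'(by omega) :: ns[k+1]'hk1 :: ns.drop (k + 2) := by
          rw [List.drop_eq_getElem_cons (by omega : k < ns.length)]
          congr 1
          rw [List.drop_eq_getElem_cons hk1]
        have hdrop1 : ns.drop (k + 1) = ns[k+1]'hk1 :: ns.drop (k + 2) :=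
          List.drop_eq_getElem_cons hk1
        rw [hdrop, hdrop1]
        by_cases h : ns[k+1]'hk1 = ns[k]'(by omega)
        · simp [adjPairs, h]; ring
        · simp [adjPairs, h]
      · have hk : ns.length = k + 1 := by omega
        rw [PySem.List.pyRange_one_eq_nil (by exact_mod_cast (by omega : (ns.length : Int) ≤ (k : Int) + 1))]
        have : ns.drop k = [ns[k]'(by omega)] := by
          rw [List.drop_eq_getElem_cons (by omega : k < ns.length)]
          simp [List.drop_eq_nil_of_le, hk]
        simp [this, adjPairs]

/-- One run step: a run of 1 + lead d t equal digits contributes d * lead d t. -/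
theorem adjPairs_run (t : List Int) : ∀ d : Int,
    adjPairs (d :: t) = d * (lead d t : Int) + adjPairs (t.drop (lead d t)) := by
  induction t with
  | nil => intro d; simp [adjPairs, lead]
  | cons x t2 ih =>
      intro d
      by_cases hx : x = d
      · subst hx
        rw [show lead x (x :: t2) = lead x t2 + 1 from by simp [lead]]
        rw [List.drop_succ_cons]
        have h1 : adjPairs (x :: x :: t2) = x + adjPairs (x :: t2) := by simp [adjPairs]
        rw [h1, ih x]
        push_cast; ring
      · simp [adjPairs, lead, hx]

theorem runsLoop_eq : ∀ (n : Nat) (ns : List Int), ns.length ≤ n →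
    ∀ acc : Int, runsSumLoop acc ns = acc + adjPairs ns := by
  intro n
  induction n with
  | zero =>
      intro ns hn acc
      have : ns = [] := List.eq_nil_of_length_eq_zero (by omega)
      subst this
      rw [runsSumLoop.eq_def]; simp [adjPairs]
  | succ n ih =>
      intro ns hn acc
      cases ns with
      | nil => rw [runsSumLoop.eq_def]; simp [adjPairs]
      | cons d t =>
          rw [runsSumLoop.eq_def]
          simp only []
          rw [ih (t.drop (lead d t)) (by simp at hn ⊢; omega)]
          rw [adjPairs_run t d]
          ring

-- ===== VERDICT (by name: the statement is the Claim_ definition above) =====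
theorem check_line_spec : Claim_equal_check_line := by
  intro line _ hpre
  unfold Spec_check_line check_line check_line_alt
  simp only []
  set ns := line.map (fun s => (PySem.Int.ofStr? s).getD 0) with hns
  have hne : ns ≠ [] := by simp [hns, hpre.1]
  have hlast : PySem.List.pyGetD ns ((ns.length : Int) - 1) 0 = PySem.List.pyGetD ns (-1) 0 := by
    rw [PySem.List.pyGetD_neg_one ns 0 hne]
    rw [show ((ns.length : Int) - 1) = ((ns.length - 1 : Nat) : Int) by
      have := List.length_pos_of_ne_nil hne
      omega]
    rw [PySem.List.pyGetD_natCast, List.getLast_eq_getElem]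
    exact List.getD_eq_getElem _ 0 (by have := List.length_pos_of_ne_nil hne; omega)
  have hloop := lemA ns ns.length 0 0 (by omega)
  simp only [Nat.cast_zero, zero_add, List.drop_zero] at hloop
  have hruns := runsLoop_eq ns.length ns (le_refl _) 0
  rw [hlast, hloop, hruns, zero_add]
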